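-- pv_equiv track=rewrite | github.com/hunterjreid/lasagna | app.py | _sequences_count
-- ===== SOURCE A (Python) =====
-- def _sequences_count(password: str) -> int:
--     if len(password) < 3:
--         return 0
--     sequences = 0
--     # Check ascending sequences in letters and digits
--     for i in range(len(password) - 2):
--         a, b, c = password[i], password[i + 1], password[i + 2]
--         if a.isalpha() and b.isalpha() and c.isalpha():
--             if ord(b) == ord(a) + 1 and ord(c) == ord(b) + 1:
--                 sequences += 1
--         if a.isdigit() and b.isdigit() and c.isdigit():
--             if int(b) == int(a) + 1 and int(c) == int(b) + 1:
--                 sequences += 1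
--     return sequences
-- ===== SOURCE B (Python) =====
-- def _sequences_count(password: str) -> int:
--     # Single pass: track the length of the current ascending same-type run;
--     # a run of length L contributes L-2 triples, added one at a time.
--     count = 0
--     run = 1
--     prev = None
--     for ch in password:
--         if prev is not None and (
--             (prev.isalpha() and ch.isalpha() and ord(ch) == ord(prev) + 1)
--             or (prev.isdigit() and ch.isdigit() and int(ch) == int(prev) + 1)
--         ):
--             run += 1
--         else:
--             run = 1
--         if run >= 3:
--             count += 1
--         prev = ch
--     return count
-- ===== Notes on version B (the rewrite author's own statement) =====
-- stated objective: faster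
-- what changed: Replaced the indexed triple-window scan (three lookups and two full condition checks per position) with a single left-to-right pass that keeps the length of the current ascending same-type run and adds one whenever the run reaches 3, so each adjacent pair is tested once.
import Mathlib
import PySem

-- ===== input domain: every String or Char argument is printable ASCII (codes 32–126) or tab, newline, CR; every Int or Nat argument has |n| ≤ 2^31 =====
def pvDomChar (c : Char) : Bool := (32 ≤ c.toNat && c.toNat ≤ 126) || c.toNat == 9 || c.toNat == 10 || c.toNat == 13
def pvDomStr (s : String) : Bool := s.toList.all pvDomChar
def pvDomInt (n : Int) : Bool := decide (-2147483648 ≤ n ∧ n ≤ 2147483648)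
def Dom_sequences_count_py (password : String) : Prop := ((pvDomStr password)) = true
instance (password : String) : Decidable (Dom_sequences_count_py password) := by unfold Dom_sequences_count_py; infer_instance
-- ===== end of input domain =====

-- B replaces A's indexed triple-window scan by a single pass keeping the length of the
-- current ascending same-type run (one pair test per adjacent position instead of three
-- indexed lookups and two triple tests per window); same O(n) asymptotics.


-- ===== PORT A =====
-- port of A's loop: password[i], password[i+1], password[i+2] are always in range for
-- i in range(len-2), so pyGetD is exact there; int(ch) on a single ASCII digit char
-- (guarded by isdigit) is exactly ord(ch) - 48.
def sequences_count_py (password : String) : Int :=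
  let l := password.toList
  if PySem.Str.len password < 3 then 0
  else
    (PySem.List.pyRange 0 (PySem.Str.len password - 2) 1).foldl
      (fun sequences i =>
        let a := PySem.List.pyGetD l i ' '
        let b := PySem.List.pyGetD l (i + 1) ' '
        let c := PySem.List.pyGetD l (i + 2) ' '
        let sequences :=
          if PySem.Chars.isalpha a && PySem.Chars.isalpha b && PySem.Chars.isalpha c then
            if (b.toNat : Int) = (a.toNat : Int) + 1 ∧ (c.toNat : Int) = (b.toNat : Int) + 1 then
              sequences + 1
            else sequences
          else sequences
        if PySem.Chars.isdigit a && PySem.Chars.isdigit b && PySem.Chars.isdigit c then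
          if (b.toNat : Int) - 48 = ((a.toNat : Int) - 48) + 1 ∧
             (c.toNat : Int) - 48 = ((b.toNat : Int) - 48) + 1 then
            sequences + 1
          else sequences
        else sequences) 0

-- ===== PORT B =====
-- does `prev, ch` continue an ascending same-type run? (B's run-continuation test)
def pvPairOk (p c : Char) : Bool :=
  (PySem.Chars.isalpha p && PySem.Chars.isalpha c &&
    decide ((c.toNat : Int) = (p.toNat : Int) + 1)) ||
  (PySem.Chars.isdigit p && PySem.Chars.isdigit c &&
    decide (((c.toNat : Int) - 48) = ((p.toNat : Int) - 48) + 1))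

def sequences_count_py_alt (password : String) : Int :=
  (password.toList.foldl
    (fun (st : Int × Int × Option Char) ch =>
      let run : Int := match st.2.2 with
        | some p => if pvPairOk p ch then st.2.1 + 1 else 1
        | none => 1
      (if run ≥ 3 then st.1 + 1 else st.1, run, some ch))
    (0, 1, none)).1

-- ===== PRECONDITION & SPEC =====
def Spec_sequences_count_py (password : String) (out : Int) : Prop := out = sequences_count_py_alt password
instance (password : String) (out : Int) : Decidable (Spec_sequences_count_py password out) := by unfold Spec_sequences_count_py; infer_instance

-- ===== CLAIM (what is proved, stated in full; the proofs are below) =====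
def Claim_equal_sequences_count_py : Prop := ∀ (password : String), Dom_sequences_count_py password → Spec_sequences_count_py password (sequences_count_py password)

-- ===== LEMMAS AND PROOFS =====

-- common specification: number of ascending same-type triples, by structural recursion
def pvTriples : List Char → Int
  | p :: c :: d :: t => (if pvPairOk p c && pvPairOk c d then 1 else 0) + pvTriples (c :: d :: t)
  | _ => 0

-- A's per-window contribution
def pvW (a b c : Char) : Int :=
  (if (PySem.Chars.isalpha a && PySem.Chars.isalpha b && PySem.Chars.isalpha c) = true ∧
      (b.toNat : Int) = (a.toNat : Int) + 1 ∧ (c.toNat : Int) = (b.toNat : Int) + 1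
   then 1 else 0) +
  (if (PySem.Chars.isdigit a && PySem.Chars.isdigit b && PySem.Chars.isdigit c) = true ∧
      (b.toNat : Int) - 48 = ((a.toNat : Int) - 48) + 1 ∧
      (c.toNat : Int) - 48 = ((b.toNat : Int) - 48) + 1
   then 1 else 0)

theorem pv_alpha_digit (c : Char) :
    ¬(PySem.Chars.isalpha c = true ∧ PySem.Chars.isdigit c = true) := by
  simp only [PySem.Chars.isalpha, PySem.Chars.isdigit, PySem.Chars.isupper, PySem.Chars.islower,
    Bool.or_eq_true, Bool.and_eq_true, decide_eq_true_eq, Char.le_def, UInt32.le_iff_toNat_le,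
    not_and]
  have h0 : ('0').val.toNat = 48 := rfl
  have h9 : ('9').val.toNat = 57 := rfl
  have hA : ('A').val.toNat = 65 := rfl
  have hZ : ('Z').val.toNat = 90 := rfl
  have ha : ('a').val.toNat = 97 := rfl
  have hz : ('z').val.toNat = 122 := rfl
  intro h1 h2
  omega

theorem pvW_eq_pair (a b c : Char) :
    pvW a b c = if pvPairOk a b && pvPairOk b c then 1 else 0 := by
  have hb := pv_alpha_digit b
  unfold pvW pvPairOk
  by_cases h1 : PySem.Chars.isalpha a = true <;>
  by_cases h2 : PySem.Chars.isalpha b = true <;>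
  by_cases h3 : PySem.Chars.isalpha c = true <;>
  by_cases h4 : PySem.Chars.isdigit a = true <;>
  by_cases h5 : PySem.Chars.isdigit b = true <;>
  by_cases h6 : PySem.Chars.isdigit c = true <;>
  simp_all

theorem pv_sum_eq_triples (l : List Char) :
    ((List.range (l.length - 2)).map
      (fun k => pvW (l.getD k ' ') (l.getD (k + 1) ' ') (l.getD (k + 2) ' '))).sum
    = pvTriples l := by
  induction l with
  | nil => simp [pvTriples]
  | cons a t ih =>
    match t with
    | [] => simp [pvTriples]
    | [b] => simp [pvTriples]
    | b :: c :: r =>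
      have hlen : (a :: b :: c :: r).length - 2 = r.length + 1 := by simp
      rw [hlen, List.range_succ_eq_map, List.map_cons, List.map_map, List.sum_cons]
      have hlen2 : (b :: c :: r).length - 2 = r.length := by simp
      have hmap :
          (List.range r.length).map
            ((fun k => pvW ((a :: b :: c :: r).getD k ' ')
                ((a :: b :: c :: r).getD (k + 1) ' ') ((a :: b :: c :: r).getD (k + 2) ' ')) ∘ Nat.succ)
          = (List.range ((b :: c :: r).length - 2)).map
            (fun k => pvW ((b :: c :: r).getD k ' ')
                ((b :: c :: r).getD (k + 1) ' ') ((b :: c :: r).getD (k + 2) ' ')) := by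
        rw [hlen2]
        refine List.map_congr_left ?_
        intro k _
        simp [Function.comp, Nat.succ_eq_add_one]
      rw [hmap, ih]
      have : pvTriples (a :: b :: c :: r) =
          (if pvPairOk a b && pvPairOk b c then 1 else 0) + pvTriples (b :: c :: r) := rfl
      rw [this, ← pvW_eq_pair]
      simp

theorem pvTriples_small (l : List Char) (h : l.length < 3) : pvTriples l = 0 := by
  match l with
  | [] => rfl
  | [_] => rfl
  | [_, _] => rfl
  | _ :: _ :: _ :: _ => simp at h; omega

theorem pvA_eq_triples (s : String) : sequences_count_py s = pvTriples s.toList := by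
  unfold sequences_count_py
  simp only [PySem.Str.len]
  by_cases h : (s.toList.length : Int) < 3
  · rw [if_pos h, pvTriples_small _ (by exact_mod_cast h)]
  · rw [if_neg h]
    have hstep : (fun (sequences : Int) (i : Int) =>
        let a := PySem.List.pyGetD s.toList i ' '
        let b := PySem.List.pyGetD s.toList (i + 1) ' '
        let c := PySem.List.pyGetD s.toList (i + 2) ' '
        let sequences :=
          if PySem.Chars.isalpha a && PySem.Chars.isalpha b && PySem.Chars.isalpha c then
            if (b.toNat : Int) = (a.toNat : Int) + 1 ∧ (c.toNat : Int) = (b.toNat : Int) + 1 then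
              sequences + 1
            else sequences
          else sequences
        if PySem.Chars.isdigit a && PySem.Chars.isdigit b && PySem.Chars.isdigit c then
          if (b.toNat : Int) - 48 = ((a.toNat : Int) - 48) + 1 ∧
             (c.toNat : Int) - 48 = ((b.toNat : Int) - 48) + 1 then
            sequences + 1
          else sequences
        else sequences)
        = (fun (sequences : Int) (i : Int) =>
            sequences + pvW (PySem.List.pyGetD s.toList i ' ')
              (PySem.List.pyGetD s.toList (i + 1) ' ') (PySem.List.pyGetD s.toList (i + 2) ' ')) := by
      funext sq i
      simp only [pvW]
      split_ifs <;> simp_all <;> ring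
    rw [hstep, PySem.List.foldl_add, PySem.List.pyRange_one, List.map_map]
    have hc : ((s.toList.length : Int) - 2 - 0).toNat = s.toList.length - 2 := by omega
    rw [hc]
    have hmap : (List.range (s.toList.length - 2)).map
        ((fun i => pvW (PySem.List.pyGetD s.toList i ' ')
            (PySem.List.pyGetD s.toList (i + 1) ' ') (PySem.List.pyGetD s.toList (i + 2) ' ')) ∘ (fun k : Nat => (0 : Int) + ↑k))
        = (List.range (s.toList.length - 2)).map
          (fun k => pvW (s.toList.getD k ' ') (s.toList.getD (k + 1) ' ') (s.toList.getD (k + 2) ' ')) := by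
      refine List.map_congr_left ?_
      intro k _
      have e2 : (k : Int) + 1 = ((k + 1 : Nat) : Int) := by push_cast; ring
      have e3 : (k : Int) + 2 = ((k + 2 : Nat) : Int) := by push_cast; ring
      simp only [Function.comp, zero_add, e2, e3, PySem.List.pyGetD_natCast]
    rw [hmap, pv_sum_eq_triples]
    ring

-- B-side model: the Bool is "the previous pair continued the run" (run ≥ 2)
def pvF : List Char → Int → Bool → Char → Int
  | [], cnt, _, _ => cnt
  | c :: t, cnt, b, p =>
    if pvPairOk p c then pvF t (cnt + if b then 1 else 0) true c else pvF t cnt false c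

theorem pvF_shift (l : List Char) : ∀ cnt k b p, pvF l (cnt + k) b p = pvF l cnt b p + k := by
  induction l with
  | nil => intro cnt k b p; simp [pvF]
  | cons c t ih =>
    intro cnt k b p
    by_cases h : pvPairOk p c = true <;> simp only [pvF, h, if_true, if_false, reduceIte]
    · have e : cnt + k + (if b then (1:Int) else 0) = (cnt + if b then 1 else 0) + k := by ring
      rw [e, ih]
    · exact ih cnt k false c

theorem pvF_true (l : List Char) (cnt : Int) (p : Char) :
    pvF l cnt true p =
      pvF l cnt false p + (match l with | c :: _ => if pvPairOk p c then (1:Int) else 0 | [] => 0) := by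
  match l with
  | [] => simp [pvF]
  | c :: t =>
    by_cases h : pvPairOk p c = true <;> simp [pvF, h, pvF_shift]

theorem pvF_false (l : List Char) : ∀ cnt p, pvF l cnt false p = cnt + pvTriples (p :: l) := by
  induction l with
  | nil => intro cnt p; simp [pvF, pvTriples]
  | cons c t ih =>
    intro cnt p
    match t with
    | [] =>
      by_cases h : pvPairOk p c = true <;> simp [pvF, h, pvTriples]
    | d :: r =>
      rw [pvF]
      have ht : pvTriples (p :: c :: d :: r) =
          (if pvPairOk p c && pvPairOk c d then 1 else 0) + pvTriples (c :: d :: r) := rfl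
      by_cases h : pvPairOk p c = true
      · rw [if_pos h, pvF_true, ih, ht]
        simp [h]
        ring
      · rw [if_neg h, ih, ht]
        simp [h]

theorem pvB_eq_triples (s : String) : sequences_count_py_alt s = pvTriples s.toList := by
  unfold sequences_count_py_alt
  have hstep : ∀ (l : List Char) (cnt r : Int) (p : Char), 1 ≤ r →
      (l.foldl (fun (st : Int × Int × Option Char) ch =>
        let run : Int := match st.2.2 with
          | some p => if pvPairOk p ch then st.2.1 + 1 else 1
          | none => 1
        (if run ≥ 3 then st.1 + 1 else st.1, run, some ch)) (cnt, r, some p)).1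
      = pvF l cnt (decide (2 ≤ r)) p := by
    intro l
    induction l with
    | nil => intro cnt r p hr; simp [pvF]
    | cons c t ih =>
      intro cnt r p hr
      by_cases h : pvPairOk p c = true
      · simp only [List.foldl_cons, h, if_true, reduceIte]
        have e1 : (if r + 1 ≥ 3 then cnt + 1 else cnt) = (cnt + if decide (2 ≤ r) = true then (1:Int) else 0) := by
          by_cases h2 : 2 ≤ r <;> simp [h2] <;> omega
        rw [e1, ih _ _ _ (by omega)]
        have e2 : decide ((2:Int) ≤ r + 1) = true := by simp; omega
        simp [pvF, h, e2]
      · simp only [List.foldl_cons, h, Bool.false_eq_true, if_false, reduceIte]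
        have e1 : (if (1:Int) ≥ 3 then cnt + 1 else cnt) = cnt := by norm_num
        rw [e1, ih _ _ _ (by norm_num)]
        have e2 : decide ((2:Int) ≤ 1) = false := by simp
        simp [pvF, h, e2]
  match hl : s.toList with
  | [] => simp [pvTriples]
  | c :: t =>
    have h2 := hstep t 0 1 c (by norm_num)
    have h3 : pvF t 0 (decide ((2:Int) ≤ 1)) c = pvTriples (c :: t) := by
      rw [show decide ((2:Int) ≤ 1) = false by simp, pvF_false]
      simp
    exact h2.trans h3

-- ===== VERDICT (by name: the statement is the Claim_ definition above) =====
theorem sequences_count_py_spec : Claim_equal_sequences_count_py := by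
  intro password _
  unfold Spec_sequences_count_py
  rw [pvA_eq_triples, pvB_eq_triples]
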